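-- pv_equiv track=rewrite | github.com/natnaelawel/competitive-programming | codeforce/Contest11/ZeroRemainder.py | findMinMove
-- ===== SOURCE A (Python) =====
-- def findMinMove(nums, k):
--     re = [(k - (n% k)) for n in nums if n % k != 0]
--     m = {}
--     mmax = -1
--     for r in re:
--         if r in m:
--             m[r] += k
--             mmax = max(mmax, m[r])
--         else:
--             m[r] = r
--             mmax = max(mmax, m[r])
--
--     return mmax + 1
-- ===== SOURCE B (Python) =====
-- def findMinMove(nums, k):
--     rem = sorted(k - n % k for n in nums if n % k)
--     m = len(rem)
--     best = -1
--     i = 0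
--     while i < m:
--         r = rem[i]
--         j = i + 1
--         while j < m and rem[j] == r:
--             j += 1
--         best = max(best, r + (j - i - 1) * k)
--         i = j
--     return best + 1
-- ===== Notes on version B (the rewrite author's own statement) =====
-- stated objective: alternative
-- what changed: A makes one hash-dict pass keeping a running accumulator per remainder (m[r] += k) and an inline running max; B sorts the needed remainders and then recursively consumes each run of equal values, applying the closed form r + (run-1)*k once per run - sort-then-run-length-scan instead of hash accumulation.
import Mathlib
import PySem

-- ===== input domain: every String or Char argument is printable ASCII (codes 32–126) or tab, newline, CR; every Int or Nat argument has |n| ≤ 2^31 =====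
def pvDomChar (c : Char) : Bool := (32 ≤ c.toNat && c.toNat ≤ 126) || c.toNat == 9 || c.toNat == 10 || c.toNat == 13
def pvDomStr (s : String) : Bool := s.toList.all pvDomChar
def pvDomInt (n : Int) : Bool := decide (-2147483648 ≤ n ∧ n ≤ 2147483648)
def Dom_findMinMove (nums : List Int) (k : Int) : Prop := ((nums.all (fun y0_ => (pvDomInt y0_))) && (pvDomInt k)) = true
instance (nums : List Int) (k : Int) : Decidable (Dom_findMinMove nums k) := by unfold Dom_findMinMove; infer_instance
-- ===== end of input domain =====

-- B replaces A's hash-dict pass with running per-remainder accumulators (m[r] += k) by a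
-- different algorithm: sort the needed remainders, then recursively consume each run of
-- equal values, applying the closed form r + (run-1)*k once per run (alternative, not faster).

-- ===== PORT A =====
def findMinMove (nums : List Int) (k : Int) : Int :=
  let re := (nums.filter (fun n => PySem.Int.mod n k != 0)).map (fun n => k - PySem.Int.mod n k)
  let st := re.foldl (fun (s : PySem.Dict Int Int × Int) r =>
      match s.1.get? r with
      | some v => (s.1.insert r (v + k), max s.2 (v + k))
      | none   => (s.1.insert r r, max s.2 r)) (PySem.Dict.empty, -1)
  st.2 + 1

-- ===== PORT B =====
-- inner while loop: j advances while j < m and rem[j] == r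
def findMinMove_runEnd (rem : List Int) (r : Int) (m j : Nat) : Nat :=
  if j < m ∧ rem.getD j 0 == r then findMinMove_runEnd rem r m (j + 1) else j
termination_by m - j
decreasing_by omega

-- needed by the outer loop's termination proof
lemma pvRunEnd_ge (rem : List Int) (r : Int) (m : Nat) :
    ∀ (d j : Nat), m - j ≤ d → j ≤ findMinMove_runEnd rem r m j := by
  intro d
  induction d with
  | zero =>
      intro j hd
      rw [findMinMove_runEnd]
      split
      · omega
      · exact le_refl j
  | succ d ih =>
      intro j hd
      rw [findMinMove_runEnd]
      split
      · exact le_trans (Nat.le_succ j) (ih (j + 1) (by omega))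
      · exact le_refl j

-- outer while loop: consume the run starting at i, fold max with its closed form, jump to j
-- (rem.getD i 0 is Python's rem[i]: the loop only reads indices i < m = len(rem))
def findMinMove_outer (k : Int) (rem : List Int) (m i : Nat) (best : Int) : Int :=
  if h : i < m then
    let r := rem.getD i 0
    let j := findMinMove_runEnd rem r m (i + 1)
    findMinMove_outer k rem m j (max best (r + ((j : Int) - (i : Int) - 1) * k))
  else best
termination_by m - i
decreasing_by
  have := pvRunEnd_ge rem (rem.getD i 0) m (m - (i + 1)) (i + 1) le_rfl
  omega

def findMinMove_alt (nums : List Int) (k : Int) : Int :=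
  let rem := PySem.List.sorted ((nums.filter (fun n => PySem.Int.mod n k != 0)).map
      (fun n => k - PySem.Int.mod n k)) (fun x => x)
  findMinMove_outer k rem rem.length 0 (-1) + 1

-- ===== PRECONDITION & SPEC =====
-- Pre_ excludes only k = 0, where the Python A raises ZeroDivisionError at 'n % k'.
def Pre_findMinMove (nums : List Int) (k : Int) : Prop := k ≠ 0
instance (nums : List Int) (k : Int) : Decidable (Pre_findMinMove nums k) := by unfold Pre_findMinMove; infer_instance
def pvWitness_findMinMove : List Int × Int := ([3, 1, 2], 2)
def Spec_findMinMove (nums : List Int) (k : Int) (out : Int) : Prop := out = findMinMove_alt nums k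
instance (nums : List Int) (k : Int) (out : Int) : Decidable (Spec_findMinMove nums k out) := by unfold Spec_findMinMove; infer_instance

-- ===== CLAIM (what is proved, stated in full; the proofs are below) =====
def Claim_equal_findMinMove : Prop := ∀ (nums : List Int) (k : Int), Dom_findMinMove nums k → Pre_findMinMove nums k → Spec_findMinMove nums k (findMinMove nums k)

-- ===== LEMMAS AND PROOFS =====

-- the list of needed remainders, re = [(k - n % k) for n in nums if n % k != 0]
def pvRe (nums : List Int) (k : Int) : List Int :=
  (nums.filter (fun n => PySem.Int.mod n k != 0)).map (fun n => k - PySem.Int.mod n k)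

-- the closed-form value of a group: r + (count - 1) * k
def pvVal (l : List Int) (k r : Int) : Int := r + ((l.count r : Int) - 1) * k

-- proof-side view of B's loops: recursion on the list consuming one run of equal values at a time
def pvGoList (k : Int) (lst : List Int) : Int :=
  match lst with
  | [] => -1
  | r :: t =>
      let run := t.takeWhile (fun y => y == r)
      max (r + (1 + (run.length : Int) - 1) * k) (pvGoList k (t.dropWhile (fun y => y == r)))
termination_by lst.length
decreasing_by
  exact Nat.lt_succ_of_le (List.length_dropWhile_le _ _)

-- A's loop state after processing l
def pvAFold (l : List Int) (k : Int) : PySem.Dict Int Int × Int :=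
  l.foldl (fun (s : PySem.Dict Int Int × Int) r =>
      match s.1.get? r with
      | some v => (s.1.insert r (v + k), max s.2 (v + k))
      | none   => (s.1.insert r r, max s.2 r)) (PySem.Dict.empty, -1)

-- raising one element of a foldl-max, given the raised value dominates the old one
lemma pvFoldMaxRaise (b : List Int) (d v v' : Int) (h : v ≤ v') :
    b.foldl max (max d v') = max (b.foldl max (max d v)) v' := by
  induction b generalizing d with
  | nil => simp only [List.foldl_nil]; omega
  | cons y t ih =>
      simp only [List.foldl_cons]
      have h1 : max (max d v') y = max (max d y) v' := by omega
      have h2 : max (max d v) y = max (max d y) v := by omega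
      rw [h1, h2, ih (max d y)]

-- characterisation of A's loop: the dict is the closed-form table over the distinct
-- remainders, and mmax is the max of the closed-form values (for 0 < k)
lemma pvAFold_char (k : Int) (hk : 0 < k) (l : List Int) :
    (∀ r, (pvAFold l k).1.get? r = if 0 < l.count r then some (pvVal l k r) else none)
    ∧ (pvAFold l k).1.keys = PySem.Set.ofList l
    ∧ (pvAFold l k).2 = ((PySem.Set.ofList l).map (pvVal l k)).foldl max (-1) := by
  induction l using List.reverseRecOn with
  | nil => refine ⟨fun r => ?_, ?_, ?_⟩ <;> simp [pvAFold, PySem.Dict.get?_empty, PySem.Dict.keys_empty, PySem.Set.ofList_nil]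
  | append_singleton l x ih =>
      obtain ⟨hget, hkeys, hmax⟩ := ih
      have hstep : pvAFold (l ++ [x]) k =
          (match (pvAFold l k).1.get? x with
           | some v => ((pvAFold l k).1.insert x (v + k), max (pvAFold l k).2 (v + k))
           | none   => ((pvAFold l k).1.insert x x, max (pvAFold l k).2 x)) := by
        simp [pvAFold, List.foldl_append]
      have hcount_other : ∀ r, r ≠ x → (l ++ [x]).count r = l.count r := by
        intro r hr
        have h0 : List.count r [x] = 0 := List.count_eq_zero.mpr (by simpa using hr)
        rw [List.count_append, h0]; omega
      have hvother : ∀ r, r ≠ x → pvVal (l ++ [x]) k r = pvVal l k r := by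
        intro r hr; unfold pvVal; rw [hcount_other r hr]
      by_cases hx : x ∈ l
      · -- x already counted: its accumulator gains one k
        have hc : 0 < l.count x := List.count_pos_iff.mpr hx
        have hgx := hget x
        rw [if_pos hc] at hgx
        rw [hstep, hgx]
        have hcx : (l ++ [x]).count x = l.count x + 1 := by
          simp [List.count_append]
        have hval : pvVal l k x + k = pvVal (l ++ [x]) k x := by
          unfold pvVal; rw [hcx]; push_cast; ring
        have hsets : PySem.Set.ofList (l ++ [x]) = PySem.Set.ofList l := by
          rw [PySem.Set.ofList_append_singleton, PySem.Set.add_of_mem ((PySem.Set.mem_ofList _ _).mpr hx)]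
        refine ⟨fun r => ?_, ?_, ?_⟩
        · rw [PySem.Dict.get?_insert]
          by_cases hr : r = x
          · rw [if_pos hr, hr, if_pos (show 0 < List.count x (l ++ [x]) by omega), hval]
          · rw [if_neg hr, hget r, hcount_other r hr, hvother r hr]
        · rw [PySem.Dict.keys_insert_of_contains, hkeys, hsets]
          rw [PySem.Dict.contains_eq_isSome_get?, hgx]; rfl
        · rw [hmax, hsets]
          have hxS : x ∈ PySem.Set.ofList l := (PySem.Set.mem_ofList _ _).mpr hx
          obtain ⟨a, b, hab⟩ := List.append_of_mem hxS
          have hnd : (PySem.Set.ofList l).Nodup := PySem.Set.nodup_ofList l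
          rw [hab] at hnd
          obtain ⟨-, hndxb, hdisj⟩ := List.nodup_append.mp hnd
          have hxa : x ∉ a := fun hmem => hdisj x hmem x (by simp) rfl
          have hxb : x ∉ b := (List.nodup_cons.mp hndxb).1
          rw [hab]
          have hmapa : a.map (pvVal (l ++ [x]) k) = a.map (pvVal l k) :=
            List.map_congr_left (fun r hr => hvother r (fun h => hxa (h ▸ hr)))
          have hmapb : b.map (pvVal (l ++ [x]) k) = b.map (pvVal l k) :=
            List.map_congr_left (fun r hr => hvother r (fun h => hxb (h ▸ hr)))
          simp only [List.map_append, List.map_cons, List.foldl_append, List.foldl_cons,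
            hmapa, hmapb, ← hval]
          exact (pvFoldMaxRaise (b.map (pvVal l k)) (List.foldl max (-1) (a.map (pvVal l k)))
            (pvVal l k x) (pvVal l k x + k) (by omega)).symm
      · -- new remainder: first occurrence, accumulator starts at x itself
        have hc : l.count x = 0 := List.count_eq_zero.mpr hx
        have hgx := hget x
        rw [if_neg (by omega)] at hgx
        rw [hstep, hgx]
        have hcx : (l ++ [x]).count x = 1 := by
          simp [List.count_append, hc]
        have hvx : pvVal (l ++ [x]) k x = x := by
          unfold pvVal; rw [hcx]; push_cast; ring
        have hsets : PySem.Set.ofList (l ++ [x]) = PySem.Set.ofList l ++ [x] := by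
          rw [PySem.Set.ofList_append_singleton, PySem.Set.add_of_not_mem (fun h => hx ((PySem.Set.mem_ofList _ _).mp h))]
        have hncont : (pvAFold l k).1.contains x = false := by
          rw [PySem.Dict.contains_eq_isSome_get?, hgx]; rfl
        refine ⟨fun r => ?_, ?_, ?_⟩
        · rw [PySem.Dict.get?_insert]
          by_cases hr : r = x
          · rw [if_pos hr, hr, if_pos (show 0 < List.count x (l ++ [x]) by omega), hvx]
          · rw [if_neg hr, hget r, hcount_other r hr, hvother r hr]
        · rw [PySem.Dict.keys_insert_of_not_contains _ _ hncont, hkeys, hsets]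
        · rw [hmax, hsets]
          have hmapa : (PySem.Set.ofList l).map (pvVal (l ++ [x]) k) = (PySem.Set.ofList l).map (pvVal l k) :=
            List.map_congr_left (fun r hr => hvother r (fun h => hx ((PySem.Set.mem_ofList _ _).mp (h ▸ hr))))
          simp [List.foldl_append, hmapa, hvx]

-- pulling a value out of a running max
lemma pvFoldMaxOut (l : List Int) (d v : Int) :
    l.foldl max (max d v) = max v (l.foldl max d) := by
  induction l generalizing d with
  | nil => simp only [List.foldl_nil]; omega
  | cons y t ih =>
      simp only [List.foldl_cons]
      have : max (max d v) y = max (max d y) v := by omega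
      rw [this, ih]

-- running max is invariant under permutation
lemma pvFoldMaxPerm {l₁ l₂ : List Int} (p : l₁.Perm l₂) (d : Int) :
    l₁.foldl max d = l₂.foldl max d := by
  induction p generalizing d with
  | nil => rfl
  | cons x _ ih => simp only [List.foldl_cons]; exact ih _
  | swap x y l =>
      simp only [List.foldl_cons]
      have : max (max d y) x = max (max d x) y := by omega
      rw [this]
  | trans _ _ ih1 ih2 => exact (ih1 d).trans (ih2 d)

-- a cons on the accumulator of the Set.add fold passes through when the element is fresh
lemma pvFoldAddCons (x : Int) (l : List Int) (hx : x ∉ l) (s : List Int) :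
    l.foldl PySem.Set.add (x :: s) = x :: l.foldl PySem.Set.add s := by
  induction l generalizing s with
  | nil => rfl
  | cons y t ih =>
      have hyx : y ≠ x := fun h => hx (h ▸ List.mem_cons_self)
      have hxt : x ∉ t := fun h => hx (List.mem_cons_of_mem _ h)
      simp only [List.foldl_cons]
      by_cases hys : y ∈ s
      · have h1 : PySem.Set.add (x :: s) y = x :: s := by
          simp [PySem.Set.add, PySem.Set.contains, hys]
        have h2 : PySem.Set.add s y = s := by
          simp [PySem.Set.add, PySem.Set.contains, hys]
        rw [h1, h2, ih hxt]
      · have h1 : PySem.Set.add (x :: s) y = x :: (s ++ [y]) := by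
          simp [PySem.Set.add, PySem.Set.contains, hys, hyx]
        have h2 : PySem.Set.add s y = s ++ [y] := by
          simp [PySem.Set.add, PySem.Set.contains, hys]
        rw [h1, h2, ih hxt]

-- absorbing a run of copies of r into an accumulator that already contains r
lemma pvFoldAddRun (r : Int) (run : List Int) (hrun : ∀ y ∈ run, y = r) (s : List Int)
    (hr : r ∈ s) : run.foldl PySem.Set.add s = s := by
  induction run with
  | nil => rfl
  | cons y t ih =>
      have hy : y = r := hrun y List.mem_cons_self
      have hs : PySem.Set.add s y = s := by
        simp [PySem.Set.add, PySem.Set.contains, hy, hr]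
      simp only [List.foldl_cons, hs]
      exact ih (fun z hz => hrun z (List.mem_cons_of_mem _ hz))

-- ofList of (r :: run ++ rest) with run all r's and r not in rest
lemma pvOfListRun (r : Int) (run rest : List Int) (hrun : ∀ y ∈ run, y = r)
    (hrest : r ∉ rest) :
    PySem.Set.ofList (r :: (run ++ rest)) = r :: PySem.Set.ofList rest := by
  rw [PySem.Set.ofList_eq_foldl, PySem.Set.ofList_eq_foldl]
  have h0 : PySem.Set.add ([] : List Int) r = [r] := by
    simp [PySem.Set.add, PySem.Set.contains]
  simp only [List.foldl_cons, List.foldl_append, h0]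
  rw [pvFoldAddRun r run hrun [r] (by simp)]
  exact pvFoldAddCons r rest hrest []

-- on a sorted list, after dropping the leading copies of the head, the head is gone
lemma pvNotMemDrop (r : Int) (t : List Int) (hpw : t.Pairwise (· ≤ ·))
    (hge : ∀ y ∈ t, r ≤ y) : r ∉ t.dropWhile (fun y => y == r) := by
  induction t with
  | nil => simp
  | cons y ys ih =>
      obtain ⟨h1, h2⟩ := List.pairwise_cons.mp hpw
      by_cases hy : y = r
      · rw [List.dropWhile_cons, if_pos (by simp [hy])]
        exact ih h2 (fun z hz => hge z (List.mem_cons_of_mem _ hz))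
      · rw [List.dropWhile_cons, if_neg (by simp [hy])]
        intro hmem
        rcases List.mem_cons.mp hmem with h | h
        · exact hy h.symm
        · have hry : r ≤ y := hge y List.mem_cons_self
          have hyr : y ≤ r := h1 r h
          exact hy (le_antisymm hyr hry)

-- characterisation of B's recursion on a sorted list
lemma pvGo_char (k : Int) :
    ∀ (n : ℕ) (l : List Int), l.length ≤ n → l.Pairwise (· ≤ ·) →
      pvGoList k l = ((PySem.Set.ofList l).map (pvVal l k)).foldl max (-1) := by
  intro n
  induction n with
  | zero =>
      intro l hl _
      have : l = [] := List.eq_nil_of_length_eq_zero (Nat.le_zero.mp hl)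
      subst this
      simp [pvGoList, PySem.Set.ofList_nil]
  | succ n ih =>
      intro l hl hpw
      match l with
      | [] => simp [pvGoList, PySem.Set.ofList_nil]
      | r :: t =>
          obtain ⟨hge, hpt⟩ := List.pairwise_cons.mp hpw
          set run := t.takeWhile (fun y => y == r) with hrundef
          set rest := t.dropWhile (fun y => y == r) with hrestdef
          have hsplit : run ++ rest = t := List.takeWhile_append_dropWhile
          have hrun : ∀ y ∈ run, y = r := by
            intro y hy
            have := List.mem_takeWhile_imp hy
            simpa using this
          have hrest_sub : rest.Sublist t := List.dropWhile_sublist _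
          have hrest_pw : rest.Pairwise (· ≤ ·) := hpt.sublist hrest_sub
          have hrmem : r ∉ rest := pvNotMemDrop r t hpt hge
          have hlen : rest.length ≤ n := by
            have h1 : rest.length ≤ t.length := hrest_sub.length_le
            have h2 : t.length + 1 ≤ n + 1 := by simpa using hl
            omega
          have hIH := ih rest hlen hrest_pw
          -- count of r in l
          have hcrun : run.count r = run.length := by
            rw [List.count_eq_length]
            intro b hb; exact (hrun b hb).symm
          have hcrest : rest.count r = 0 := List.count_eq_zero.mpr hrmem
          have hcr : (r :: t).count r = run.length + 1 := by
            rw [← hsplit]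
            simp [List.count_append, hcrun, hcrest]
          -- counts of other values are unaffected by the run
          have hcother : ∀ r', r' ≠ r → (r :: t).count r' = rest.count r' := by
            intro r' hr'
            rw [← hsplit]
            have hczero : run.count r' = 0 :=
              List.count_eq_zero.mpr (fun h => hr' (hrun r' h))
            simp only [List.count_cons, List.count_append, hczero]
            simp [Ne.symm hr']
          have hvother : ∀ r' ∈ PySem.Set.ofList rest, pvVal (r :: t) k r' = pvVal rest k r' := by
            intro r' hr'
            have hr'mem : r' ∈ rest := (PySem.Set.mem_ofList _ _).mp hr'
            have hne : r' ≠ r := fun h => hrmem (h ▸ hr'mem)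
            unfold pvVal; rw [hcother r' hne]
          have hofl : PySem.Set.ofList (r :: t) = r :: PySem.Set.ofList rest := by
            rw [← hsplit]; exact pvOfListRun r run rest hrun hrmem
          have hstep : pvGoList k (r :: t) =
              max (r + (1 + (run.length : Int) - 1) * k) (pvGoList k rest) := by
            rw [pvGoList]
          rw [hstep, hIH, hofl]
          have hvr : pvVal (r :: t) k r = r + (1 + (run.length : Int) - 1) * k := by
            unfold pvVal; rw [hcr]; push_cast; ring
          rw [List.map_cons, List.map_congr_left hvother, List.foldl_cons, hvr,
            pvFoldMaxOut]

-- every needed remainder is ≤ -1 when k < 0 (Python's % has the divisor's sign)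
lemma pvReNeg (nums : List Int) (k : Int) (hk : k < 0) :
    ∀ r ∈ pvRe nums k, r ≤ -1 := by
  intro r hr
  obtain ⟨n, hn, hrn⟩ := List.mem_map.mp hr
  have hmem := List.mem_filter.mp hn
  have hne : PySem.Int.mod n k ≠ 0 := by simpa using hmem.2
  have hb := PySem.Int.mod_neg_bounds (a := n) hk
  omega

-- for k < 0, A's running max never leaves its initial -1: every accumulator value stays ≤ -1
lemma pvANeg (k : Int) (hk : k < 0) (l : List Int) (hl : ∀ r ∈ l, r ≤ -1) :
    ∀ (d : PySem.Dict Int Int) (m : Int), m = -1 → (∀ r v, d.get? r = some v → v ≤ -1) →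
      (l.foldl (fun (s : PySem.Dict Int Int × Int) r =>
          match s.1.get? r with
          | some v => (s.1.insert r (v + k), max s.2 (v + k))
          | none   => (s.1.insert r r, max s.2 r)) (d, m)).2 = -1 := by
  induction l with
  | nil => intro d m hm _; simpa using hm
  | cons r t ih =>
      intro d m hm hd
      have hr : r ≤ -1 := hl r List.mem_cons_self
      have hlt : ∀ z ∈ t, z ≤ -1 := fun z hz => hl z (List.mem_cons_of_mem _ hz)
      simp only [List.foldl_cons]
      cases hget : d.get? r with
      | some v =>
          have hv : v ≤ -1 := hd r v hget
          have hmax : max m (v + k) = -1 := by omega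
          exact ih hlt _ _ hmax (by
            intro r' v' hv'
            rw [PySem.Dict.get?_insert] at hv'
            by_cases hrr : r' = r
            · rw [if_pos hrr] at hv'
              have : v' = v + k := (Option.some.injEq _ _ ▸ hv').symm
              omega
            · rw [if_neg hrr] at hv'; exact hd r' v' hv')
      | none =>
          have hmax : max m r = -1 := by omega
          exact ih hlt _ _ hmax (by
            intro r' v' hv'
            rw [PySem.Dict.get?_insert] at hv'
            by_cases hrr : r' = r
            · rw [if_pos hrr] at hv'
              have : v' = r := (Option.some.injEq _ _ ▸ hv').symm
              omega
            · rw [if_neg hrr] at hv'; exact hd r' v' hv')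

-- for k < 0 and all elements ≤ -1, B's recursion returns -1 too
lemma pvGoNeg (k : Int) (hk : k < 0) :
    ∀ (n : ℕ) (l : List Int), l.length ≤ n → (∀ r ∈ l, r ≤ -1) →
      pvGoList k l = -1 := by
  intro n
  induction n with
  | zero =>
      intro l hl _
      have : l = [] := List.eq_nil_of_length_eq_zero (Nat.le_zero.mp hl)
      subst this; simp [pvGoList]
  | succ n ih =>
      intro l hl hle
      match l with
      | [] => simp [pvGoList]
      | r :: t =>
          have hr : r ≤ -1 := hle r List.mem_cons_self
          have hrest_sub : (t.dropWhile (fun y => y == r)).Sublist t := List.dropWhile_sublist _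
          have hlen : (t.dropWhile (fun y => y == r)).length ≤ n := by
            have := hrest_sub.length_le
            simp at hl; omega
          have hIH := ih _ hlen (fun z hz =>
            hle z (List.mem_cons_of_mem _ (hrest_sub.subset hz)))
          rw [pvGoList, hIH]
          have hcand : r + (1 + ((t.takeWhile (fun y => y == r)).length : Int) - 1) * k ≤ -1 := by
            have h0 : (0 : Int) ≤ ((t.takeWhile (fun y => y == r)).length : Int) := by positivity
            nlinarith
          omega


-- the seed of a running max is a lower bound of its result
lemma pvLeFoldMax (l : List Int) (d : Int) : d ≤ l.foldl max d := by
  induction l generalizing d with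
  | nil => simp
  | cons y t ih => exact le_trans (le_max_left d y) (ih (max d y))

lemma pvDropWhileEq (p : Int → Bool) (l : List Int) :
    l.dropWhile p = l.drop (l.takeWhile p).length := by
  induction l with
  | nil => rfl
  | cons a t ih =>
      by_cases hp : p a
      · rw [List.dropWhile_cons, if_pos hp, List.takeWhile_cons, if_pos hp]
        simpa using ih
      · rw [List.dropWhile_cons, if_neg hp, List.takeWhile_cons, if_neg hp]
        rfl

lemma pvDropSucc (rem : List Int) (j : Nat) (y : Int) (t : List Int)
    (h : rem.drop j = y :: t) : rem.drop (j + 1) = t := by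
  have h1 : rem.drop (j + 1) = (rem.drop j).drop 1 := by
    rw [List.drop_drop]
  rw [h1, h]
  rfl

lemma pvGetDrop (rem : List Int) (j : Nat) (y : Int) (t : List Int)
    (h : rem.drop j = y :: t) : rem.getD j 0 = y := by
  have hj : j < rem.length := by
    by_contra hj
    rw [List.drop_eq_nil_of_le (by omega)] at h
    exact absurd h (by simp)
  have h0 : (rem.drop j)[0]'(by rw [h]; simp) = y := by simp [h]
  rw [List.getElem_drop] at h0
  rw [List.getD_eq_getElem rem 0 hj]
  simpa using h0

-- the inner while loop advances exactly over the leading run equal to r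
lemma pvRunEnd_spec (rem : List Int) (r : Int) :
    ∀ (t : List Int) (j : Nat), rem.drop j = t →
      findMinMove_runEnd rem r rem.length j = j + (t.takeWhile (fun y => y == r)).length := by
  intro t
  induction t with
  | nil =>
      intro j h
      have hj : rem.length ≤ j := by
        have := List.length_drop (l := rem) (i := j)
        rw [h] at this
        simp at this
        omega
      rw [findMinMove_runEnd, if_neg (by intro hc; omega)]
      simp
  | cons y t' ih =>
      intro j h
      have hj : j < rem.length := by
        by_contra hj
        rw [List.drop_eq_nil_of_le (by omega)] at h
        exact absurd h (by simp)
      have hget : rem.getD j 0 = y := pvGetDrop rem j y t' h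
      have hdrop : rem.drop (j + 1) = t' := pvDropSucc rem j y t' h
      rw [findMinMove_runEnd]
      by_cases hy : y = r
      · rw [if_pos ⟨hj, by rw [hget, hy]; simp⟩, ih (j + 1) hdrop]
        rw [List.takeWhile_cons, if_pos (by simp [hy])]
        simp
        omega
      · rw [if_neg (by intro hc; rw [hget] at hc; simp [hy] at hc)]
        rw [List.takeWhile_cons, if_neg (by simp [hy])]
        simp

-- the outer while loop from index i computes the run recursion on the suffix rem[i:]
lemma pvOuter_spec (k : Int) (rem : List Int) :
    ∀ (n : Nat) (t : List Int) (i : Nat) (best : Int), t.length ≤ n → rem.drop i = t →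
      -1 ≤ best →
      findMinMove_outer k rem rem.length i best = max best (pvGoList k t) := by
  intro n
  induction n with
  | zero =>
      intro t i best hn h hb
      have ht : t = [] := List.eq_nil_of_length_eq_zero (Nat.le_zero.mp hn)
      subst ht
      have hi : rem.length ≤ i := by
        have := List.length_drop (l := rem) (i := i)
        rw [h] at this
        simp at this
        omega
      rw [findMinMove_outer, dif_neg (by omega)]
      simp [pvGoList]
      omega
  | succ n ih =>
      intro t i best hn h hb
      cases t with
      | nil =>
          have hi : rem.length ≤ i := by
            have := List.length_drop (l := rem) (i := i)
            rw [h] at this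
            simp at this
            omega
          rw [findMinMove_outer, dif_neg (by omega)]
          simp [pvGoList]
          omega
      | cons r0 t' =>
          have hi : i < rem.length := by
            have := List.length_drop (l := rem) (i := i)
            rw [h] at this
            simp at this
            omega
          have hget : rem.getD i 0 = r0 := pvGetDrop rem i r0 t' h
          have hdrop1 : rem.drop (i + 1) = t' := pvDropSucc rem i r0 t' h
          have hrun := pvRunEnd_spec rem r0 t' (i + 1) hdrop1
          have hsplit : t'.takeWhile (fun y => y == r0) ++ t'.dropWhile (fun y => y == r0) = t' :=
            List.takeWhile_append_dropWhile
          have hdropj : rem.drop (i + 1 + (t'.takeWhile (fun y => y == r0)).length)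
              = t'.dropWhile (fun y => y == r0) := by
            have h2 : rem.drop (i + 1 + (t'.takeWhile (fun y => y == r0)).length)
                = (rem.drop (i + 1)).drop (t'.takeWhile (fun y => y == r0)).length := by
              rw [List.drop_drop]
            rw [h2, hdrop1, ← pvDropWhileEq]
          have hrest_len : (t'.dropWhile (fun y => y == r0)).length ≤ n := by
            have h1 : (t'.dropWhile (fun y => y == r0)).length ≤ t'.length :=
              List.length_dropWhile_le _ _
            simp at hn
            omega
          have hb' : (-1 : Int) ≤ max best (r0 + (((i + 1 + (t'.takeWhile (fun y => y == r0)).length : Nat) : Int) - (i : Int) - 1) * k) :=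
            le_trans hb (le_max_left _ _)
          rw [findMinMove_outer, dif_pos hi]
          simp only [hget, hrun]
          rw [ih (t'.dropWhile (fun y => y == r0)) (i + 1 + (t'.takeWhile (fun y => y == r0)).length)
            _ hrest_len hdropj hb']
          have hstep : pvGoList k (r0 :: t') =
              max (r0 + (1 + ((t'.takeWhile (fun y => y == r0)).length : Int) - 1) * k)
                (pvGoList k (t'.dropWhile (fun y => y == r0))) := by
            rw [pvGoList]
          rw [hstep]
          have hC : r0 + (((i + 1 + (t'.takeWhile (fun y => y == r0)).length : Nat) : Int) - (i : Int) - 1) * k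
              = r0 + (1 + ((t'.takeWhile (fun y => y == r0)).length : Int) - 1) * k := by
            push_cast
            ring
          rw [hC, max_assoc]

-- ===== VERDICT (by name: the statement is the Claim_ definition above) =====
theorem findMinMove_spec : Claim_equal_findMinMove := by
  intro nums k _ hk0
  unfold Spec_findMinMove findMinMove findMinMove_alt
  show (pvAFold (pvRe nums k) k).2 + 1 =
    findMinMove_outer k (PySem.List.sorted (pvRe nums k) (fun x => x))
      (PySem.List.sorted (pvRe nums k) (fun x => x)).length 0 (-1) + 1
  set s := PySem.List.sorted (pvRe nums k) (fun x => x) with hsdef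
  have houter : findMinMove_outer k s s.length 0 (-1) = max (-1) (pvGoList k s) :=
    pvOuter_spec k s s.length s 0 (-1) le_rfl rfl le_rfl
  rw [houter]
  rcases lt_or_gt_of_ne hk0 with hneg | hk
  · -- k < 0: both sides compute -1 + 1
    have hA : (pvAFold (pvRe nums k) k).2 = -1 :=
      pvANeg k hneg (pvRe nums k) (pvReNeg nums k hneg) PySem.Dict.empty (-1) rfl
        (by intro r v hv; rw [PySem.Dict.get?_empty] at hv; exact absurd hv (by simp))
    have hB : pvGoList k s = -1 := by
      refine pvGoNeg k hneg _ _ le_rfl ?_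
      intro r hr
      exact pvReNeg nums k hneg r ((PySem.List.mem_sorted _ _ _ _).mp hr)
    rw [hA, hB]
    norm_num
  · -- 0 < k: both sides are the max of the closed-form group values
    obtain ⟨-, -, hmax⟩ := pvAFold_char k hk (pvRe nums k)
    have hperm : s.Perm (pvRe nums k) := PySem.List.sorted_perm _ _ _
    have hpw : s.Pairwise (· ≤ ·) := by
      have := PySem.List.sorted_pairwise (pvRe nums k) (fun x => x)
      simpa using this
    rw [hmax, pvGo_char k s.length s le_rfl hpw]
    have hge := pvLeFoldMax ((PySem.Set.ofList s).map (pvVal s k)) (-1)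
    rw [max_eq_right hge]
    congr 1
    have hval : (PySem.Set.ofList s).map (pvVal s k) = (PySem.Set.ofList s).map (pvVal (pvRe nums k) k) := by
      apply List.map_congr_left
      intro r _
      unfold pvVal
      rw [hperm.count_eq]
    rw [hval]
    have hsetperm : (PySem.Set.ofList s).Perm (PySem.Set.ofList (pvRe nums k)) := by
      rw [List.perm_ext_iff_of_nodup (PySem.Set.nodup_ofList _) (PySem.Set.nodup_ofList _)]
      intro a
      rw [PySem.Set.mem_ofList, PySem.Set.mem_ofList]
      exact ⟨fun h => hperm.mem_iff.mp h, fun h => hperm.mem_iff.mpr h⟩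
    exact (pvFoldMaxPerm (hsetperm.map _) (-1)).symm
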